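-- pv_equiv track=rewrite | github.com/pypi-data/pypi-mirror-328 | packages/adpa/adpa-0.1.5-py3-none-any.whl/adpa/text2sql/validation.py | _check_quotes
-- ===== SOURCE A (Python) =====
-- def _check_quotes(query: str) -> bool:
--     """Check for properly matched quotes.
--
--     Args:
--         query: SQL query string
--
--     Returns:
--         True if quotes are properly matched, False otherwise
--     """
--     stack = []
--     in_string = False
--     string_char = None
--
--     for char in query:
--         if char in ["'", "\""]:
--             if not in_string:
--                 in_string = True
--                 string_char = char
--                 stack.append(char)
--             elif char == string_char:
--                 if stack:
--                     stack.pop()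
--                     in_string = False
--                     string_char = None
--
--     return len(stack) == 0
-- ===== SOURCE B (Python) =====
-- def _check_quotes(query: str) -> bool:
--     """Check for properly matched quotes by repeatedly cutting off the first
--     complete quoted region; True iff nothing un-closable remains."""
--     rest = query
--     while True:
--         p = next((k for k, c in enumerate(rest) if c in "'\""), -1)
--         if p == -1:
--             return True
--         j = rest.find(rest[p], p + 1)
--         if j == -1:
--             return False
--         rest = rest[j + 1:]
-- ===== Notes on version B (the rewrite author's own statement) =====
-- stated objective: alternative
-- what changed: Replaced A's character-by-character state machine (stack + in_string + string_char) by a skip/cut recursion: find the first quote, find its matching partner, drop the whole quoted region, repeat; True iff no unmatched quote remains.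
import Mathlib
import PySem

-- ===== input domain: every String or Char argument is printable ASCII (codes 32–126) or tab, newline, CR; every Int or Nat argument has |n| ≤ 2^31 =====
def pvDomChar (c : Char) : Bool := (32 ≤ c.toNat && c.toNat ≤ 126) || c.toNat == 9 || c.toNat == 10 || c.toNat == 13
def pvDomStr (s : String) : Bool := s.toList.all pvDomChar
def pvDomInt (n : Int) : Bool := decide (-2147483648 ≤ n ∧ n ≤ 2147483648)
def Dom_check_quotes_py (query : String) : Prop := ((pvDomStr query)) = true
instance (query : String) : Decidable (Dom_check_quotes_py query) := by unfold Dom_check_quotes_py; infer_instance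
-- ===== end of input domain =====

-- B replaces A's stack/in_string state machine by repeatedly cutting off the first
-- complete quoted region and recursing on the remainder (objective: alternative).

-- ===== PORT A =====
-- state = (stack, in_string, string_char), exactly A's three variables
def pvStepA (st : List Char × Bool × Option Char) (c : Char) : List Char × Bool × Option Char :=
  if c == '\'' || c == '"' then
    if !st.2.1 then (st.1 ++ [c], true, some c)
    else if st.2.2 == some c then
      if st.1 ≠ [] then (st.1.dropLast, false, none) else st
    else st
  else st

def check_quotes_py (query : String) : Bool :=
  (query.toList.foldl pvStepA ([], false, none)).1.length == 0

-- ===== PORT B =====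
-- rest.find(rest[p], p+1): drop everything up to and including the matching quote
def pvFindAfter (q : Char) : List Char → Option (List Char)
  | [] => none
  | c :: cs => if c == q then some cs else pvFindAfter q cs

theorem pvFindAfter_length (q : Char) : ∀ (l r : List Char), pvFindAfter q l = some r → r.length < l.length := by
  intro l
  induction l with
  | nil => intro r h; simp [pvFindAfter] at h
  | cons c cs ih =>
    intro r h
    simp only [pvFindAfter] at h
    by_cases hc : c == q
    · simp [hc] at h; simp [← h]
    · simp [hc] at h
      have := ih r h
      simp; omega

def pvAltGo : List Char → Bool
  | [] => true
  | c :: cs =>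
    if c == '\'' || c == '"' then
      match h : pvFindAfter c cs with
      | none => false
      | some rest => pvAltGo rest
    else pvAltGo cs
termination_by l => l.length
decreasing_by
  · have := pvFindAfter_length c cs rest h; simp; omega
  · simp

def check_quotes_py_alt (query : String) : Bool := pvAltGo query.toList

-- ===== PRECONDITION & SPEC =====
def Spec_check_quotes_py (query : String) (out : Bool) : Prop := out = check_quotes_py_alt query
instance (query : String) (out : Bool) : Decidable (Spec_check_quotes_py query out) := by unfold Spec_check_quotes_py; infer_instance

-- ===== CLAIM (what is proved, stated in full; the proofs are below) =====
def Claim_equal_check_quotes_py : Prop := ∀ (query : String), Dom_check_quotes_py query → Spec_check_quotes_py query (check_quotes_py query)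

-- ===== LEMMAS AND PROOFS =====

-- while A is inside a q-quoted string, nothing changes until the matching q arrives
theorem pvFold_inString (q : Char) (hq : q = '\'' ∨ q = '"') : ∀ (l : List Char),
    List.foldl pvStepA ([q], true, some q) l =
      (match pvFindAfter q l with
       | none => ([q], true, some q)
       | some rest => List.foldl pvStepA ([], false, none) rest) := by
  intro l
  induction l with
  | nil => simp [pvFindAfter]
  | cons c cs ih =>
    by_cases hc : c = q
    · subst hc
      have hquote : (c == '\'' || c == '"') = true := by
        rcases hq with h | h <;> simp [h]
      simp [List.foldl, pvStepA, hquote, pvFindAfter, List.dropLast]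
    · have hne : (c == q) = false := by simp [hc]
      have hstep : pvStepA ([q], true, some q) c = ([q], true, some q) := by
        simp only [pvStepA]
        by_cases hcq : (c == '\'' || c == '"') = true
        · simp [hcq, Ne.symm hc]
        · simp [hcq]
      simp only [List.foldl, hstep, pvFindAfter, hne]
      exact ih

theorem pvMain : ∀ (n : Nat) (l : List Char), l.length ≤ n →
    ((List.foldl pvStepA ([], false, none) l).1.length == 0) = pvAltGo l := by
  intro n
  induction n with
  | zero =>
    intro l hl
    have : l = [] := List.eq_nil_of_length_eq_zero (Nat.le_zero.mp hl)
    subst this; simp [pvAltGo]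
  | succ n ih =>
    intro l hl
    cases l with
    | nil => simp [pvAltGo]
    | cons c cs =>
      by_cases hq : (c == '\'' || c == '"') = true
      · have hstep : pvStepA ([], false, none) c = ([c], true, some c) := by
          simp [pvStepA, hq]
        have hq' : c = '\'' ∨ c = '"' := by
          rcases Bool.or_eq_true_iff.mp hq with h | h
          · exact Or.inl (by simpa using h)
          · exact Or.inr (by simpa using h)
        rw [show List.foldl pvStepA ([], false, none) (c :: cs)
              = List.foldl pvStepA ([c], true, some c) cs by simp [List.foldl, hstep]]
        rw [pvFold_inString c hq' cs]
        rw [pvAltGo]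
        simp only [hq, if_true]
        cases hfa : pvFindAfter c cs with
        | none => simp
        | some rest =>
          have hlen := pvFindAfter_length c cs rest hfa
          exact ih rest (by simp at hl; omega)
      · have hstep : pvStepA ([], false, none) c = ([], false, none) := by
          simp [pvStepA, hq]
        rw [show List.foldl pvStepA ([], false, none) (c :: cs)
              = List.foldl pvStepA ([], false, none) cs by simp [List.foldl, hstep]]
        rw [pvAltGo]
        simp only [hq]
        exact ih cs (by simp at hl; omega)

-- ===== VERDICT (by name: the statement is the Claim_ definition above) =====
theorem check_quotes_py_spec : Claim_equal_check_quotes_py := by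
  intro query _
  unfold Spec_check_quotes_py check_quotes_py check_quotes_py_alt
  exact pvMain query.toList.length query.toList (le_refl _)
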